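-- pv_equiv track=rewrite | github.com/thinkSharp/meta_coding_puzzles | level_2_2_hops.py | getSecondsRequired
-- ===== SOURCE A (Python) =====
-- from typing import List
--
-- def getSecondsRequired(N: int, F: int, P: List[int]) -> int:
--     if F == 1:
--       return N - P[0]
--
--     second = 0
--
--     P.sort()
--
--     for i in range(F):
--       if i + 1 != F:
--         hops = P[i+1] - P[i]
--         second += hops - 1 if hops != 0 else 0
--
--     second += (N-1) - P[-1]
--     second += F
--
--
--     return second
-- ===== SOURCE B (Python) =====
-- def getSecondsRequired(N, F, P):
--     if F == 1:
--         return N - P[0]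
--     # Count occurrences per pad, sort only the DISTINCT positions, then one
--     # prefix-count scan finds the F-th smallest position (kth) and the number
--     # of distinct positions among the F smallest (d).  The sorted gap sum
--     # telescopes to kth - min - (d - 1), so no full sort and no gap loop.
--     counts = {}
--     for x in P:
--         counts[x] = counts.get(x, 0) + 1
--     vals = sorted(counts)
--     seen = 0
--     d = 0
--     kth = 0
--     for v in vals:
--         seen += counts[v]
--         d += 1
--         kth = v
--         if seen >= F:
--             break
--     return (N - 1) - vals[-1] + F + (kth - vals[0]) - (d - 1)
-- ===== Notes on version B (the rewrite author's own statement) =====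
-- stated objective: alternative
-- what changed: B counts occurrences per position in a dict, sorts only the distinct positions, and a single prefix-count scan yields the F-th smallest position and the distinct count among the F smallest, replacing A's full sort plus adjacent-gap loop by the telescoped closed form last - first - (distinct - 1); B also does not mutate P.
import Mathlib
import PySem

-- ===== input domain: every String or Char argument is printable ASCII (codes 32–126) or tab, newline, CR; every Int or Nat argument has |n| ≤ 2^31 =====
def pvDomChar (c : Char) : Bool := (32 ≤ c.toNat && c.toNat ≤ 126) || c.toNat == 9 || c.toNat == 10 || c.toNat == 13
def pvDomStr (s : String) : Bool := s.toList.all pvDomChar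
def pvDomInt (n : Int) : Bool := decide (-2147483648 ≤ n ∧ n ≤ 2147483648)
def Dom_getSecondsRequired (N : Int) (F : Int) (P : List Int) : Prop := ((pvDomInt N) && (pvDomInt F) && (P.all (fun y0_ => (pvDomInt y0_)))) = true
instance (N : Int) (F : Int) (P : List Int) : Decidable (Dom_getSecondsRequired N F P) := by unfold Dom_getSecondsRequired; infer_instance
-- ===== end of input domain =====

-- B counts occurrences per position in a dict, sorts only the DISTINCT positions, and one
-- prefix-count scan finds the F-th smallest position and the distinct count among the F
-- smallest, replacing A's full sort + adjacent-gap loop by the telescoped closed form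
-- (objective: alternative). A sorts P in place; the equivalence proved here is about the
-- RETURN value only (B does not mutate P).

-- ===== PORT A =====
def getSecondsRequired (N : Int) (F : Int) (P : List Int) : Int :=
  if F = 1 then
    N - (PySem.List.pyGet? P 0).getD 0
  else
    let Ps := PySem.List.sorted P (fun x => x) false
    let second : Int :=
      (PySem.List.pyRange 0 F 1).foldl (fun second i =>
        if i + 1 ≠ F then
          let hops := (PySem.List.pyGet? Ps (i + 1)).getD 0 - (PySem.List.pyGet? Ps i).getD 0
          second + (if hops ≠ 0 then hops - 1 else 0)
        else second) 0
    let second := second + ((N - 1) - (PySem.List.pyGet? Ps (-1)).getD 0)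
    let second := second + F
    second

-- ===== PORT B =====
-- B's scan loop: for v in vals: seen += counts[v]; d += 1; kth = v; if seen >= F: break
def bScan (counts : PySem.Dict Int Int) (F : Int) : List Int → Int → Int → Int → Int × Int × Int
  | [], seen, d, kth => (seen, d, kth)
  | v :: vs, seen, d, _kth =>
      let seen' := seen + counts.getD v 0
      if F ≤ seen' then (seen', d + 1, v) else bScan counts F vs seen' (d + 1) v

def getSecondsRequired_alt (N : Int) (F : Int) (P : List Int) : Int :=
  if F = 1 then
    N - (PySem.List.pyGet? P 0).getD 0
  else
    let counts : PySem.Dict Int Int :=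
      P.foldl (fun d x => d.insert x (d.getD x 0 + 1)) PySem.Dict.empty
    let vals := PySem.List.sorted counts.keys (fun x => x) false
    let r := bScan counts F vals 0 0 0
    (N - 1) - (PySem.List.pyGet? vals (-1)).getD 0 + F
      + (r.2.2 - (PySem.List.pyGet? vals 0).getD 0) - (r.2.1 - 1)

-- ===== PRECONDITION & SPEC =====
-- Pre_ is exactly A's domain: P nonempty (else P[0] / P[-1] raise IndexError) and
-- F ≤ len(P) (else the loop's P[i+1] raises IndexError).
def Pre_getSecondsRequired (N : Int) (F : Int) (P : List Int) : Prop :=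
  P ≠ [] ∧ F ≤ (P.length : Int)
instance (N : Int) (F : Int) (P : List Int) : Decidable (Pre_getSecondsRequired N F P) := by
  unfold Pre_getSecondsRequired; infer_instance

def pvWitness_getSecondsRequired : Int × Int × List Int := (5, 2, [1, 3])

def Spec_getSecondsRequired (N : Int) (F : Int) (P : List Int) (out : Int) : Prop := out = getSecondsRequired_alt N F P
instance (N : Int) (F : Int) (P : List Int) (out : Int) : Decidable (Spec_getSecondsRequired N F P out) := by unfold Spec_getSecondsRequired; infer_instance

-- ===== CLAIM (what is proved, stated in full; the proofs are below) =====
def Claim_equal_getSecondsRequired : Prop := ∀ (N : Int) (F : Int) (P : List Int), Dom_getSecondsRequired N F P → Pre_getSecondsRequired N F P → Spec_getSecondsRequired N F P (getSecondsRequired N F P)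

-- ===== LEMMAS AND PROOFS =====

-- chain S = the sum A's loop accumulates over the adjacent gaps of the sorted list S
def chain : List Int → Int
  | a :: b :: t => (if b - a ≠ 0 then b - a - 1 else 0) + chain (b :: t)
  | _ => 0

-- ndist S = number of distinct values of a sorted list S, read off adjacent pairs
def ndist : List Int → Int
  | [] => 0
  | [_] => 1
  | a :: b :: t => (if a = b then 0 else 1) + ndist (b :: t)

-- the gap term A adds at index k (on the sorted list S)
def gap (S : List Int) (k : Nat) : Int :=
  let hops := S[k + 1]?.getD 0 - S[k]?.getD 0
  if hops ≠ 0 then hops - 1 else 0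

-- telescoping: the gap sum of any list equals last - head - (ndist - 1)
theorem chain_eq (a : Int) (t : List Int) :
    chain (a :: t) = (a :: t).getLast (by simp) - a - (ndist (a :: t) - 1) := by
  induction t generalizing a with
  | nil => simp [chain, ndist]
  | cons b t ih =>
    have h := ih b
    simp only [chain, ndist, List.getLast_cons_cons] at *
    by_cases hab : a = b
    · subst hab; simp only [sub_self, ne_eq, not_true_eq_false, if_false, ite_true, h]; simp
    · have h1 : b - a ≠ 0 := by omega
      rw [if_pos h1, if_neg hab, h]
      ring

theorem chain_eq' (l : List Int) (hne : l ≠ []) :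
    chain l = l.getLast hne - l.head hne - (ndist l - 1) := by
  obtain ⟨a, t, rfl⟩ := List.exists_cons_of_ne_nil hne
  simpa using chain_eq a t

-- the indexed gap sum equals the structural chain
theorem sum_gap (S : List Int) :
    ((List.range (S.length - 1)).map (gap S)).sum = chain S := by
  match S with
  | [] => simp [chain]
  | [a] => simp [chain]
  | a :: b :: t =>
    have ih := sum_gap (b :: t)
    have hlen : (a :: b :: t).length - 1 = ((b :: t).length - 1) + 1 := by simp
    rw [hlen, List.range_succ_eq_map, List.map_cons, List.map_map, List.sum_cons]
    have h0 : gap (a :: b :: t) 0 = (if b - a ≠ 0 then b - a - 1 else 0) := by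
      simp [gap]
    have hshift : ∀ k : Nat, gap (a :: b :: t) (k + 1) = gap (b :: t) k := by
      intro k; simp [gap]
    have hmap : (List.range ((b :: t).length - 1)).map (gap (a :: b :: t) ∘ Nat.succ)
        = (List.range ((b :: t).length - 1)).map (gap (b :: t)) := by
      apply List.map_congr_left; intro k _; exact hshift k
    rw [hmap, ih, h0, chain]

-- for a sorted list, ndist counts the distinct elements
theorem ndist_eq_card (S : List Int) (h : S.Pairwise (· ≤ ·)) :
    ndist S = (S.toFinset.card : Int) := by
  match S with
  | [] => simp [ndist]
  | [a] => simp [ndist]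
  | a :: b :: t =>
    have h' := h.of_cons
    have ih := ndist_eq_card (b :: t) h'
    by_cases hab : a = b
    · subst hab
      have hts : (a :: a :: t).toFinset = (a :: t).toFinset := by simp
      rw [ndist, ih, hts]; simp
    · have hblt : ∀ x ∈ t, b ≤ x := by
        intro x hx; exact (List.pairwise_cons.1 h').1 x hx
      have halt : a < b := lt_of_le_of_ne ((List.pairwise_cons.1 h).1 b (by simp)) hab
      have hnot : a ∉ (b :: t).toFinset := by
        simp only [List.mem_toFinset, List.mem_cons]
        rintro (rfl | hx)
        · exact hab rfl
        · exact absurd (hblt a hx) (by omega)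
      rw [ndist, ih]
      rw [show (a :: b :: t).toFinset = insert a (b :: t).toFinset from by simp]
      rw [Finset.card_insert_of_notMem hnot]
      simp [hab]; ring

-- ndist of a constant block is 1
theorem ndist_replicate (k : Nat) (hk : 1 ≤ k) (v : Int) :
    ndist (List.replicate k v) = 1 := by
  induction k with
  | zero => omega
  | succ m ih =>
    cases m with
    | zero => simp [ndist]
    | succ m' =>
      rw [List.replicate_succ, List.replicate_succ, ndist, ← List.replicate_succ]
      rw [ih (by omega)]
      simp

-- prepending a constant block of a fresh value adds exactly one distinct value
theorem ndist_replicate_append (c : Nat) (hc : 1 ≤ c) (v : Int) (t : List Int)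
    (ht : t ≠ []) (hh : ∀ x ∈ t, v ≠ x) :
    ndist (List.replicate c v ++ t) = 1 + ndist t := by
  induction c with
  | zero => omega
  | succ m ih =>
    cases m with
    | zero =>
      obtain ⟨b, t', rfl⟩ := List.exists_cons_of_ne_nil ht
      rw [show List.replicate 1 v ++ b :: t' = v :: b :: t' from by simp, ndist]
      rw [if_neg (hh b (by simp))]
    | succ m' =>
      have hrec := ih (by omega)
      obtain ⟨b, r, hbr⟩ : ∃ b r, List.replicate (m' + 1) v ++ t = b :: r := by
        cases hx : List.replicate (m' + 1) v ++ t with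
        | nil => simp at hx
        | cons b r => exact ⟨b, r, rfl⟩
      have hb : b = v := by
        have : (List.replicate (m' + 1) v ++ t).head? = some v := by
          simp [List.replicate_succ]
        rw [hbr] at this; simpa using this
      rw [List.replicate_succ, List.cons_append, hbr, hb, ndist, if_pos rfl]
      have hvr : v :: r = List.replicate (m' + 1) v ++ t := by rw [hbr, hb]
      rw [hvr, hrec]
      ring

-- the flattened grouped list: each distinct value v repeated counts[v] times
def flat (counts : PySem.Dict Int Int) (vals : List Int) : List Int :=
  vals.flatMap (fun v => List.replicate (counts.getD v 0).toNat v)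

-- flat of a strictly increasing value list is sorted
theorem flat_pairwise (counts : PySem.Dict Int Int) (vals : List Int)
    (h : vals.Pairwise (· < ·)) : (flat counts vals).Pairwise (· ≤ ·) := by
  induction vals with
  | nil => simp [flat]
  | cons v vs ih =>
    rw [flat, List.flatMap_cons, List.pairwise_append]
    refine ⟨List.pairwise_replicate_of_refl, ih h.of_cons, ?_⟩
    intro a ha b hb
    obtain ⟨w, hw, hbw⟩ := List.mem_flatMap.1 hb
    rw [List.eq_of_mem_replicate ha, List.eq_of_mem_replicate hbw]
    exact le_of_lt ((List.pairwise_cons.1 h).1 w hw)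

-- counts of elements in the flattened list
theorem count_flat (counts : PySem.Dict Int Int) (vals : List Int) (hnd : vals.Nodup)
    (x : Int) :
    (flat counts vals).count x
      = if x ∈ vals then (counts.getD x 0).toNat else 0 := by
  induction vals with
  | nil => simp [flat]
  | cons v vs ih =>
    rw [flat, List.flatMap_cons, List.count_append]
    have ih' := ih (List.nodup_cons.1 hnd).2
    rw [flat] at ih'
    rw [ih', List.count_replicate]
    by_cases hxv : x = v
    · subst hxv
      have : x ∉ vs := (List.nodup_cons.1 hnd).1
      simp [this]
    · simp [hxv, Ne.symm hxv]

-- the sorted list IS the flattened grouped list over the sorted distinct values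
theorem sorted_eq_flat (P : List Int) (counts : PySem.Dict Int Int)
    (hc : ∀ v, counts.getD v 0 = (P.count v : Int)) :
    PySem.List.sorted P (fun x => x) false
      = flat counts (PySem.List.sorted (PySem.Set.ofList P) (fun x => x) false) := by
  set vals := PySem.List.sorted (PySem.Set.ofList P) (fun x => x) false with hvals
  have hpwlt : vals.Pairwise (· < ·) := PySem.List.sorted_ofList_pairwise_lt P
  have hnd : vals.Nodup := hpwlt.nodup
  have hmemv : ∀ x, x ∈ vals ↔ x ∈ P := by
    intro x
    rw [hvals, PySem.List.mem_sorted, PySem.Set.mem_ofList]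
  apply PySem.List.sorted_id_eq_of_perm_of_pairwise
  · rw [List.perm_iff_count]
    intro x
    rw [count_flat counts vals hnd x]
    by_cases hx : x ∈ vals
    · rw [if_pos hx, hc x]; simp
    · rw [if_neg hx]
      have : x ∉ P := fun hxp => hx ((hmemv x).2 hxp)
      simp [List.count_eq_zero_of_not_mem this]
  · exact flat_pairwise counts vals hpwlt

-- sorted lists with the same members share head and last
theorem head_le_of_sorted (l : List Int) (h : l.Pairwise (· ≤ ·)) (hn : l ≠ [])
    (x : Int) (hx : x ∈ l) : l.head hn ≤ x := by
  obtain ⟨a, t, rfl⟩ := List.exists_cons_of_ne_nil hn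
  rcases List.mem_cons.1 hx with rfl | hxt
  · simp
  · exact (List.pairwise_cons.1 h).1 x hxt

theorem le_getLast_of_sorted : ∀ (l : List Int), l.Pairwise (· ≤ ·) → ∀ (hn : l ≠ [])
    (x : Int), x ∈ l → x ≤ l.getLast hn := by
  intro l
  induction l with
  | nil => intro _ hn; exact absurd rfl hn
  | cons a t ih =>
    intro h hn x hx
    cases t with
    | nil => simp at hx ⊢; omega
    | cons b u =>
      rw [List.getLast_cons_cons]
      rcases List.mem_cons.1 hx with rfl | hxt
      · calc x ≤ (b :: u).head (by simp) := (List.pairwise_cons.1 h).1 _ (by simp)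
             _ ≤ (b :: u).getLast (by simp) := ih h.of_cons (by simp) _ (List.head_mem _)
      · exact ih h.of_cons (by simp) x hxt

theorem head_eq_of_sorted_mem (l₁ l₂ : List Int)
    (h₁ : l₁.Pairwise (· ≤ ·)) (h₂ : l₂.Pairwise (· ≤ ·))
    (hn₁ : l₁ ≠ []) (hn₂ : l₂ ≠ []) (hm : ∀ x, x ∈ l₁ ↔ x ∈ l₂) :
    l₁.head hn₁ = l₂.head hn₂ :=
  le_antisymm
    (head_le_of_sorted l₁ h₁ hn₁ _ ((hm _).2 (List.head_mem hn₂)))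
    (head_le_of_sorted l₂ h₂ hn₂ _ ((hm _).1 (List.head_mem hn₁)))

theorem getLast_eq_of_sorted_mem (l₁ l₂ : List Int)
    (h₁ : l₁.Pairwise (· ≤ ·)) (h₂ : l₂.Pairwise (· ≤ ·))
    (hn₁ : l₁ ≠ []) (hn₂ : l₂ ≠ []) (hm : ∀ x, x ∈ l₁ ↔ x ∈ l₂) :
    l₁.getLast hn₁ = l₂.getLast hn₂ :=
  le_antisymm
    (le_getLast_of_sorted l₂ h₂ hn₂ _ ((hm _).1 (List.getLast_mem hn₁)))
    (le_getLast_of_sorted l₁ h₁ hn₁ _ ((hm _).2 (List.getLast_mem hn₂)))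

-- B's scan: on strictly increasing vals with positive counts, it returns the
-- distinct count and the last element of the first (F - seen) positions of flat
theorem bScan_spec (counts : PySem.Dict Int Int) (F : Int) :
    ∀ (vals : List Int) (seen d kth : Int),
      vals.Pairwise (· < ·) →
      (∀ v ∈ vals, 1 ≤ counts.getD v 0) →
      1 ≤ F - seen →
      F - seen ≤ ((flat counts vals).length : Int) →
      (bScan counts F vals seen d kth).2.1
          = d + ndist ((flat counts vals).take (F - seen).toNat) ∧
      (bScan counts F vals seen d kth).2.2
          = ((flat counts vals).take (F - seen).toNat).getLast?.getD 0 := by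
  intro vals
  induction vals with
  | nil =>
    intro seen d kth _ _ h1 h2
    simp [flat] at h2
    omega
  | cons v vs ih =>
    intro seen d kth hpw hpos h1 h2
    have hc1 : 1 ≤ counts.getD v 0 := hpos v (by simp)
    set c : Int := counts.getD v 0 with hc
    clear_value c
    have hcN : (c.toNat : Int) = c := by omega
    have hflat : flat counts (v :: vs)
        = List.replicate c.toNat v ++ flat counts vs := by
      rw [flat, List.flatMap_cons, hc]; rfl
    rw [bScan]
    rw [← hc]
    by_cases hstop : F ≤ seen + c
    · -- stops here: the first F - seen elements are all v
      rw [if_pos hstop]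
      have hk : (F - seen).toNat ≤ c.toNat := by omega
      have htake : (flat counts (v :: vs)).take (F - seen).toNat
          = List.replicate (F - seen).toNat v := by
        rw [hflat, List.take_append_of_le_length (by simp [hk]), List.take_replicate]
        congr 1; omega
      have hk1 : 1 ≤ (F - seen).toNat := by omega
      constructor
      · rw [htake, ndist_replicate _ hk1 v]
      · rw [htake]
        cases hx : (F - seen).toNat with
        | zero => omega
        | succ m => simp [List.getLast?_replicate]
    · -- continues: strip the block of v's
      rw [if_neg hstop]
      have hlen : ((flat counts (v :: vs)).length : Int)
          = c + ((flat counts vs).length : Int) := by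
        rw [hflat]; push_cast [List.length_append, List.length_replicate]; omega
      have hns : 1 ≤ F - (seen + c) := by omega
      have hnl : F - (seen + c) ≤ ((flat counts vs).length : Int) := by omega
      have hrec := ih (seen + c) (d + 1) v hpw.of_cons
        (fun w hw => hpos w (by simp [hw])) hns hnl
      have hfne : flat counts vs ≠ [] := by
        intro hnil
        rw [hnil] at hnl
        simp at hnl
        omega
      have hmemvs : ∀ x ∈ flat counts vs, v ≠ x := by
        intro x hx
        obtain ⟨w, hw, hxw⟩ := List.mem_flatMap.1 hx
        have : x = w := List.eq_of_mem_replicate hxw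
        subst this
        exact ne_of_lt ((List.pairwise_cons.1 hpw).1 x hw)
      have hksplit : (F - seen).toNat = c.toNat + (F - (seen + c)).toNat := by omega
      have htake : (flat counts (v :: vs)).take (F - seen).toNat
          = List.replicate c.toNat v ++ (flat counts vs).take (F - (seen + c)).toNat := by
        rw [hflat, hksplit, List.take_append]
        congr 2
        · rw [List.take_replicate]; congr 1; omega
        · simp only [List.length_replicate]
          omega
      have htne : (flat counts vs).take (F - (seen + c)).toNat ≠ [] := by
        intro hnil
        rcases List.take_eq_nil_iff.1 hnil with h | h
        · omega
        · exact hfne h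
      constructor
      · rw [hrec.1, htake,
          ndist_replicate_append c.toNat (by omega) v _ htne
            (fun x hx => hmemvs x (List.mem_of_mem_take hx))]
        ring
      · rw [hrec.2, htake, List.getLast?_append_of_ne_nil _ htne]

-- counts built by B's dict loop are the multiplicities in P
theorem counts_getD (P : List Int) (v : Int) :
    (P.foldl (fun d x => d.insert x (d.getD x 0 + 1))
        (PySem.Dict.empty : PySem.Dict Int Int)).getD v 0
      = (P.count v : Int) := by
  rw [PySem.Dict.getD_foldl_insert_add_one]
  simp

-- keys of B's dict loop are the distinct elements of P in first-occurrence order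
theorem counts_keys (P : List Int) :
    (P.foldl (fun d x => d.insert x (d.getD x 0 + 1))
        (PySem.Dict.empty : PySem.Dict Int Int)).keys
      = PySem.Set.ofList P := by
  rw [PySem.Dict.keys_foldl_insert, PySem.Dict.keys_empty, PySem.Set.ofList_eq_foldl]
  rfl

-- Python's xs[-1] on a nonempty list is its last element
theorem pyGet_neg_one (l : List Int) (h : l ≠ []) :
    (PySem.List.pyGet? l (-1)).getD 0 = l.getLast h := by
  have hl : 1 ≤ l.length := List.length_pos_iff.2 h
  simp only [PySem.List.pyGet?, PySem.List.pyIdx?]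
  have h1 : ¬ ((0:Int) ≤ -1) := by omega
  have h2 : -(l.length : Int) ≤ -1 := by omega
  simp only [h1, if_false, h2, if_true, Option.bind_some]
  rw [show ((-(-1:Int)).toNat) = 1 from rfl]
  rw [show l[l.length - 1]? = l.getLast? from (List.getLast?_eq_getElem?).symm]
  rw [List.getLast?_eq_some_getLast h]
  rfl

-- Python's xs[0] on a nonempty list is its head
theorem pyGet_zero (l : List Int) (h : l ≠ []) :
    (PySem.List.pyGet? l 0).getD 0 = l.head h := by
  rw [show (0:Int) = ((0:Nat):Int) from rfl, PySem.List.pyGet?_natCast]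
  cases l with
  | nil => exact absurd rfl h
  | cons a t => rfl

-- A's loop (over range(F)) computes the chain of the first F elements of the sorted list
theorem loop_eq_chain (F : Int) (P : List Int) (hF2 : 2 ≤ F) (hFlen : F ≤ (P.length : Int)) :
    (PySem.List.pyRange 0 F 1).foldl (fun second i =>
        if i + 1 ≠ F then
          second + (if ((PySem.List.pyGet? (PySem.List.sorted P (fun x => x) false) (i + 1)).getD 0
                        - (PySem.List.pyGet? (PySem.List.sorted P (fun x => x) false) i).getD 0) ≠ 0
                    then ((PySem.List.pyGet? (PySem.List.sorted P (fun x => x) false) (i + 1)).getD 0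
                        - (PySem.List.pyGet? (PySem.List.sorted P (fun x => x) false) i).getD 0) - 1
                    else 0)
        else second) 0
      = chain ((PySem.List.sorted P (fun x => x) false).take F.toNat) := by
  set S := PySem.List.sorted P (fun x => x) false with hS
  have hSlen : S.length = P.length := (PySem.List.sorted_perm P (fun x => x) false).length_eq
  set L := F.toNat with hLdef
  have hFL : F = ((L : Nat) : Int) := by omega
  have hL2 : 2 ≤ L := by omega
  have hLS : L ≤ S.length := by omega
  rw [hFL, PySem.List.pyRange_zero_natCast, List.foldl_map]
  rw [show List.range L = List.range ((L - 1) + 1) from by rw [Nat.sub_add_cancel (by omega)],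
    List.range_succ, List.foldl_append]
  have hlast : ¬ (((L - 1 : Nat) : Int) + 1 ≠ ((L : Nat) : Int)) := by
    omega
  rw [List.foldl_cons, if_neg hlast, List.foldl_nil]
  have htake : ∀ k : Nat, k < L → (S.take L)[k]? = S[k]? := by
    intro k hk
    rw [List.getElem?_take]
    simp [hk]
  have hbody : ∀ (acc : Int), ∀ k ∈ List.range (L - 1),
      (fun second (k : Nat) =>
        if ((k : Int)) + 1 ≠ ((L : Nat) : Int) then
          second + (if ((PySem.List.pyGet? S (((k : Int)) + 1)).getD 0
                        - (PySem.List.pyGet? S ((k : Int))).getD 0) ≠ 0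
                    then ((PySem.List.pyGet? S (((k : Int)) + 1)).getD 0
                        - (PySem.List.pyGet? S ((k : Int))).getD 0) - 1
                    else 0)
        else second) acc k = acc + gap (S.take L) k := by
    intro acc k hk
    have hk' : k < L - 1 := List.mem_range.1 hk
    have hne : ((k : Int)) + 1 ≠ ((L : Nat) : Int) := by omega
    simp only [if_pos hne]
    have e1 : ((k : Int)) + 1 = (((k + 1 : Nat)) : Int) := by push_cast; ring
    rw [e1, PySem.List.pyGet?_natCast, PySem.List.pyGet?_natCast]
    rw [gap, ← htake k (by omega), ← htake (k + 1) (by omega)]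
  rw [PySem.List.foldl_congr_mem _ _ (fun acc k => acc + gap (S.take L) k) 0 hbody]
  rw [PySem.List.foldl_add]
  have hs := sum_gap (S.take L)
  rw [show (S.take L).length = L from by simp [List.length_take]; omega] at hs
  rw [hs]
  ring

-- ===== VERDICT (by name: the statement is the Claim_ definition above) =====
theorem getSecondsRequired_spec : Claim_equal_getSecondsRequired := by
  intro N F P _hdom hpre
  obtain ⟨hPne, hFlen⟩ := hpre
  unfold Spec_getSecondsRequired getSecondsRequired_alt
  by_cases hF1 : F = 1
  · rw [getSecondsRequired, if_pos hF1, if_pos hF1]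
  · rw [getSecondsRequired, if_neg hF1, if_neg hF1]
    simp only [counts_keys]
    set counts : PySem.Dict Int Int :=
      P.foldl (fun d x => d.insert x (d.getD x 0 + 1)) PySem.Dict.empty with hcounts
    set vals := PySem.List.sorted (PySem.Set.ofList P) (fun x => x) false with hvals
    set S := PySem.List.sorted P (fun x => x) false with hS
    have hSne : S ≠ [] := by simpa [hS, PySem.List.sorted_eq_nil_iff] using hPne
    have hSlen : S.length = P.length := (PySem.List.sorted_perm P (fun x => x) false).length_eq
    have hvpwlt : vals.Pairwise (· < ·) := PySem.List.sorted_ofList_pairwise_lt P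
    have hvpw : vals.Pairwise (· ≤ ·) := hvpwlt.imp le_of_lt
    have hSpw : S.Pairwise (· ≤ ·) := by
      simpa [hS] using PySem.List.sorted_pairwise P (fun x => x)
    have hmem : ∀ x, x ∈ vals ↔ x ∈ S := by
      intro x
      rw [hvals, hS, PySem.List.mem_sorted, PySem.List.mem_sorted, PySem.Set.mem_ofList]
    have hvne : vals ≠ [] := by
      obtain ⟨a, t, hat⟩ := List.exists_cons_of_ne_nil hSne
      intro hnil
      have : a ∈ vals := (hmem a).2 (by rw [hat]; simp)
      rw [hnil] at this
      simp at this
    have hcgetD : ∀ v, counts.getD v 0 = (P.count v : Int) := fun v => counts_getD P v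
    have hSflat : S = flat counts vals := sorted_eq_flat P counts hcgetD
    have hglast : vals.getLast hvne = S.getLast hSne :=
      getLast_eq_of_sorted_mem vals S hvpw hSpw hvne hSne hmem
    have hhead : vals.head hvne = S.head hSne :=
      head_eq_of_sorted_mem vals S hvpw hSpw hvne hSne hmem
    rw [pyGet_neg_one vals hvne, pyGet_zero vals hvne, hglast, hhead]
    by_cases hF2 : 2 ≤ F
    · -- main case: 2 ≤ F ≤ len(P)
      rw [loop_eq_chain F P hF2 hFlen]
      have hpos : ∀ v ∈ vals, 1 ≤ counts.getD v 0 := by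
        intro v hv
        rw [hcgetD v]
        have : v ∈ P := by
          rw [← PySem.List.mem_sorted P (fun x => x) false]
          exact (hmem v).1 hv
        have := List.count_pos_iff.2 this
        omega
      have hspec := bScan_spec counts F vals 0 0 0 hvpwlt hpos
        (by omega)
        (by rw [← hSflat]; omega)
      have hF0 : F - 0 = F := by ring
      rw [hF0] at hspec
      rw [← hSflat] at hspec
      rw [hspec.1, hspec.2]
      have htne : S.take F.toNat ≠ [] := by
        intro hnil
        rcases List.take_eq_nil_iff.1 hnil with h | h
        · omega
        · exact hSne h
      have hlast? : (S.take F.toNat).getLast?.getD 0 = (S.take F.toNat).getLast htne := by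
        rw [List.getLast?_eq_some_getLast htne]; rfl
      have hheadtake : (S.take F.toNat).head htne = S.head hSne := by
        rw [List.head_take]
      rw [hlast?, chain_eq' (S.take F.toNat) htne, hheadtake, pyGet_neg_one S hSne]
      ring
    · -- F ≤ 0: A's loop is empty; B's scan stops at the first distinct value
      have hFle : F ≤ 0 := by omega
      have hempty : PySem.List.pyRange 0 F 1 = [] := by
        simp [PySem.List.pyRange]; omega
      rw [hempty, List.foldl_nil]
      obtain ⟨v, vs, hvv⟩ := List.exists_cons_of_ne_nil hvne
      have hvP : v ∈ P := by
        rw [← PySem.List.mem_sorted P (fun x => x) false]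
        exact (hmem v).1 (by rw [hvv]; simp)
      have hc1 : 1 ≤ counts.getD v 0 := by
        rw [hcgetD v]
        have := List.count_pos_iff.2 hvP
        omega
      have hscan : bScan counts F vals 0 0 0 = (0 + counts.getD v 0, 0 + 1, v) := by
        rw [hvv, bScan, if_pos (by omega)]
      rw [hscan, pyGet_neg_one S hSne]
      have hheadv : vals.head hvne = v := by
        have h2 : vals.head? = some v := by rw [hvv]; rfl
        rw [List.head?_eq_some_head hvne] at h2
        exact Option.some.inj h2
      have hv2 : v = S.head hSne := by rw [← hhead]; exact hheadv.symm
      rw [hv2]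
      ring
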